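-- pv_equiv track=rewrite | github.com/itistamtran/cpp-cs4200-artificial-intelligence-fall25 | asgn1-8-queens-problem/src/gui/app.py | find_conflict_rows
-- ===== SOURCE A (Python) =====
-- from typing import List, Tuple, Optional
--
-- def find_conflict_rows(state: List[int]) -> set:
--     """Return a set of row indices whose queens are in conflict."""
--     rows = set()
--     n = len(state)
--     for row1 in range(n):
--         col1 = state[row1]
--         if col1 < 0:
--             continue
--         for row2 in range(row1 + 1, n):
--             col2 = state[row2]
--             if col2 < 0:
--                 continue
--             if col1 == col2 or abs(row1 - row2) == abs(col1 - col2):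
--                 rows.add(row1)
--                 rows.add(row2)
--     return rows
-- ===== SOURCE B (Python) =====
-- def find_conflict_rows(state):
--     """Return a set of row indices whose queens are in conflict."""
--     n = len(state)
--     # index rows by column / both diagonals once
--     pairs = [(g, r) for r, c in enumerate(state) if c >= 0
--              for g in ((0, c), (1, r - c), (2, r + c))]
--     groups = {}
--     for g, r in pairs:
--         groups.setdefault(g, []).append(r)
--     out = set()
--     for r1 in range(n):
--         c1 = state[r1]
--         if c1 < 0:
--             continue
--         partners = sorted(x for g in ((0, c1), (1, r1 - c1), (2, r1 + c1))
--                           for x in groups.get(g, []) if x > r1)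
--         if partners:
--             out.add(r1)
--             out.update(partners)
--     return out
-- ===== Notes on version B (the rewrite author's own statement) =====
-- stated objective: alternative
-- what changed: B replaces A's scan of every queen pair with three hash indexes (column, both diagonals) built in one pass, so each row only visits its actual conflict partners instead of all later rows.
import Mathlib
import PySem

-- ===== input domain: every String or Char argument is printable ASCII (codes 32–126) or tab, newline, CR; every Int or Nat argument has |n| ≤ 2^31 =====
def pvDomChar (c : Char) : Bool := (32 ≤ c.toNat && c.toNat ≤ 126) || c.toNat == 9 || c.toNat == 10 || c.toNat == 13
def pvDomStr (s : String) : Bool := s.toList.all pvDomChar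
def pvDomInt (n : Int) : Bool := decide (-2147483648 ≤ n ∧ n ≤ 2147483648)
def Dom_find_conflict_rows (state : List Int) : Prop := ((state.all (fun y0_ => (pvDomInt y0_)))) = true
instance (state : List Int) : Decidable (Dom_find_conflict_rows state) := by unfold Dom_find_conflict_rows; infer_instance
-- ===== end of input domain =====

-- B replaces A's all-pairs scan by three hash indexes (column and the two diagonals) built in one
-- pass, so each row only meets its actual conflict partners; same returned set (proved equal as the
-- Lean insertion-ordered lists).

-- ===== PORT A =====
def find_conflict_rows (state : List Int) : List Int :=
  let n : Int := PySem.List.len state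
  (PySem.List.pyRange 0 n).foldl (fun rows row1 =>
    let col1 := PySem.List.pyGetD state row1 0
    if col1 < 0 then rows
    else
      (PySem.List.pyRange (row1 + 1) n).foldl (fun rows row2 =>
        let col2 := PySem.List.pyGetD state row2 0
        if col2 < 0 then rows
        else if col1 = col2 ∨ (row1 - row2).natAbs = (col1 - col2).natAbs then
          PySem.Set.add (PySem.Set.add rows row1) row2
        else rows) rows)
    PySem.Set.empty

-- ===== PORT B =====
def find_conflict_rows_alt (state : List Int) : List Int :=
  let n : Int := PySem.List.len state
  let pairs : List ((Int × Int) × Int) :=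
    (PySem.List.enumerate state).flatMap (fun rc =>
      if 0 ≤ rc.2 then
        [(((0 : Int), rc.2), rc.1), ((1, rc.1 - rc.2), rc.1), ((2, rc.1 + rc.2), rc.1)]
      else [])
  let groups : PySem.Dict (Int × Int) (List Int) :=
    pairs.foldl (fun d p => d.modify p.1 [] (fun l => l ++ [p.2])) PySem.Dict.empty
  (PySem.List.pyRange 0 n).foldl (fun out r1 =>
    let c1 := PySem.List.pyGetD state r1 0
    if c1 < 0 then out
    else
      let partners := PySem.List.sorted
        ([((0 : Int), c1), (1, r1 - c1), (2, r1 + c1)].flatMap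
          (fun g => (groups.getD g []).filter (fun x => r1 < x)))
        (fun x => x)
      if partners = [] then out
      else PySem.Set.update (PySem.Set.add out r1) partners)
    PySem.Set.empty

-- ===== PRECONDITION & SPEC =====
def Spec_find_conflict_rows (state : List Int) (out : List Int) : Prop := out = find_conflict_rows_alt state
instance (state : List Int) (out : List Int) : Decidable (Spec_find_conflict_rows state out) := by unfold Spec_find_conflict_rows; infer_instance

-- ===== CLAIM (what is proved, stated in full; the proofs are below) =====
def Claim_equal_find_conflict_rows : Prop := ∀ (state : List Int), Dom_find_conflict_rows state → Spec_find_conflict_rows state (find_conflict_rows state)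

-- ===== LEMMAS AND PROOFS =====

-- the column of row j (proof-side abbreviation)
def pvC (state : List Int) (j : Int) : Int := PySem.List.pyGetD state j 0

-- "row j belongs to group g" (g = (0, col) / (1, row-col) / (2, row+col))
def pvGP (state : List Int) (g : Int × Int) (j : Int) : Bool :=
  decide (0 ≤ pvC state j) &&
  decide (g = (0, pvC state j) ∨ g = (1, j - pvC state j) ∨ g = (2, j + pvC state j))

lemma pv_add_of_mem {s : PySem.Set Int} {x : Int} (h : x ∈ s) : s.add x = s := by
  simp [PySem.Set.add, PySem.Set.contains, h]

lemma pv_foldl_addadd_mem (r1 : Int) (P : List Int) :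
    ∀ (T : PySem.Set Int), r1 ∈ T →
      P.foldl (fun s x => PySem.Set.add (PySem.Set.add s r1) x) T = P.foldl PySem.Set.add T := by
  induction P with
  | nil => intro T _; rfl
  | cons a t ih =>
      intro T hT
      simp only [List.foldl_cons, pv_add_of_mem hT]
      exact ih _ (by rw [PySem.Set.mem_add]; exact Or.inl hT)

lemma pv_foldl_addadd (r1 : Int) (P : List Int) (S : PySem.Set Int) :
    P.foldl (fun s x => PySem.Set.add (PySem.Set.add s r1) x) S =
      if P = [] then S else PySem.Set.update (PySem.Set.add S r1) P := by
  cases P with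
  | nil => rfl
  | cons a t =>
      simp only [List.foldl_cons, reduceCtorEq]
      have hmem : r1 ∈ (PySem.Set.add S r1).add a := by
        rw [PySem.Set.mem_add]; exact Or.inl (by rw [PySem.Set.mem_add]; exact Or.inr rfl)
      rw [pv_foldl_addadd_mem r1 t _ hmem]
      rfl

lemma pv_head (state : List Int) (g : Int × Int) (j : Int) :
    List.map (fun (p : (Int × Int) × Int) => p.2)
      (List.filter (fun p => p.1 == g)
        (if 0 ≤ PySem.List.pyGetD state j 0 then
          [(((0 : Int), PySem.List.pyGetD state j 0), j),
           ((1, j - PySem.List.pyGetD state j 0), j),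
           ((2, j + PySem.List.pyGetD state j 0), j)]
        else [])) = if pvGP state g j = true then [j] else [] := by
  obtain ⟨gt, gv⟩ := g
  by_cases h0 : 0 ≤ PySem.List.pyGetD state j 0
  · simp only [if_pos h0, List.filter_cons, List.filter_nil, beq_iff_eq, pvGP, pvC,
      decide_eq_true_eq, Bool.and_eq_true, Prod.mk.injEq]
    by_cases e0 : gt = 0 ∧ gv = PySem.List.pyGetD state j 0
    · obtain ⟨rfl, rfl⟩ := e0; simp [h0]
    · by_cases e1 : gt = 1 ∧ gv = j - PySem.List.pyGetD state j 0
      · obtain ⟨rfl, rfl⟩ := e1; simp [h0]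
      · by_cases e2 : gt = 2 ∧ gv = j + PySem.List.pyGetD state j 0
        · obtain ⟨rfl, rfl⟩ := e2; simp [h0]
        · rw [if_neg (fun h => e0 ⟨h.1.symm, h.2.symm⟩),
            if_neg (fun h => e1 ⟨h.1.symm, h.2.symm⟩),
            if_neg (fun h => e2 ⟨h.1.symm, h.2.symm⟩),
            if_neg (by tauto)]
          rfl
  · simp [h0, pvGP, pvC]

lemma pv_pairs_filter (state : List Int) (g : Int × Int) (l : List Int) :
    ((l.flatMap (fun j =>
        if 0 ≤ PySem.List.pyGetD state j 0 then
          [(((0 : Int), PySem.List.pyGetD state j 0), j),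
           ((1, j - PySem.List.pyGetD state j 0), j),
           ((2, j + PySem.List.pyGetD state j 0), j)]
        else [])).filter (fun p => p.1 == g)).map (fun p => p.2) =
      l.filter (pvGP state g) := by
  induction l with
  | nil => rfl
  | cons j t ih =>
      simp only [List.flatMap_cons, List.filter_append, List.map_append, ih, List.filter_cons,
        pv_head]
      by_cases h : pvGP state g j = true
      · simp [h]
      · simp [h]

lemma pv_groups_getD (state : List Int) (g : Int × Int) :
    (((PySem.List.enumerate state).flatMap (fun rc =>
        if 0 ≤ rc.2 then
          [(((0 : Int), rc.2), rc.1), ((1, rc.1 - rc.2), rc.1), ((2, rc.1 + rc.2), rc.1)]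
        else [])).foldl (fun d p => d.modify p.1 [] (fun l => l ++ [p.2])) PySem.Dict.empty).getD g [] =
      (PySem.List.pyRange 0 (PySem.List.len state)).filter (pvGP state g) := by
  rw [PySem.Dict.getD_foldl_modify_append, PySem.List.enumerate_eq_map_pyRange state 0,
    List.flatMap_map]
  simp only [PySem.Dict.getD_empty, List.nil_append]
  exact pv_pairs_filter state g _

def pvAP (state : List Int) (row1 col1 : Int) (x : Int) : Bool :=
  !decide (pvC state x < 0) &&
  decide (col1 = pvC state x ∨ (row1 - x).natAbs = (col1 - pvC state x).natAbs)


lemma pv_partners_eq (state : List Int) (r1 : Int) (h0 : 0 ≤ r1) :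
    PySem.List.sorted
      ([((0 : Int), pvC state r1), (1, r1 - pvC state r1), (2, r1 + pvC state r1)].flatMap
        (fun g => ((PySem.List.pyRange 0 (PySem.List.len state)).filter (pvGP state g)).filter
          (fun x => r1 < x)))
      (fun x => x) =
      (PySem.List.pyRange (r1 + 1) (PySem.List.len state)).filter (pvAP state r1 (pvC state r1)) := by
  have hmem : ∀ (g : Int × Int) (x : Int),
      x ∈ ((PySem.List.pyRange 0 (PySem.List.len state)).filter (pvGP state g)).filter
        (fun x => decide (r1 < x)) ↔ (0 ≤ x ∧ x < PySem.List.len state) ∧ pvGP state g x = true ∧ r1 < x := by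
    intro g x
    simp [List.mem_filter, PySem.List.mem_pyRange_one]
    tauto
  apply PySem.List.sorted_eq_of_perm_of_pairwise_lt
  · rw [List.perm_ext_iff_of_nodup ((PySem.List.nodup_pyRange_one _ _).filter _)]
    · intro a
      simp only [List.flatMap_cons, List.flatMap_nil, List.append_nil, List.mem_append, hmem,
        List.mem_filter, PySem.List.mem_pyRange_one, pvGP, pvAP, Bool.and_eq_true,
        Bool.not_eq_eq_eq_not, Bool.not_true, decide_eq_true_eq, decide_eq_false_iff_not,
        Prod.mk.injEq]
      constructor
      · rintro ⟨⟨ha1, ha2⟩, hca, hc | hc⟩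
        · exact Or.inl ⟨⟨by omega, ha2⟩, ⟨by omega, Or.inl ⟨trivial, hc⟩⟩, by omega⟩
        · by_cases hd : r1 - pvC state r1 = a - pvC state a
          · exact Or.inr (Or.inl ⟨⟨by omega, ha2⟩, ⟨by omega, Or.inr (Or.inl ⟨trivial, hd⟩)⟩, by omega⟩)
          · have hs : r1 + pvC state r1 = a + pvC state a := by omega
            exact Or.inr (Or.inr ⟨⟨by omega, ha2⟩, ⟨by omega, Or.inr (Or.inr ⟨trivial, hs⟩)⟩, by omega⟩)
      · rintro (⟨⟨_, ha2⟩, ⟨hca, hc⟩, hlt⟩ | ⟨⟨_, ha2⟩, ⟨hca, hc⟩, hlt⟩ | ⟨⟨_, ha2⟩, ⟨hca, hc⟩, hlt⟩) <;>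
          refine ⟨⟨by omega, ha2⟩, by omega, ?_⟩ <;> omega
    · simp only [List.flatMap_cons, List.flatMap_nil, List.append_nil]
      rw [List.nodup_append, List.nodup_append]
      have hnodup : ∀ (g : Int × Int),
          (((PySem.List.pyRange 0 (PySem.List.len state)).filter (pvGP state g)).filter
            (fun x => decide (r1 < x))).Nodup :=
        fun g => ((PySem.List.nodup_pyRange_one _ _).filter _).filter _
      refine ⟨hnodup _, ⟨hnodup _, hnodup _, ?_⟩, ?_⟩
      · intro a ha b hb heq
        subst heq
        rw [hmem] at ha hb
        simp only [pvGP, Bool.and_eq_true, decide_eq_true_eq, Prod.mk.injEq] at ha hb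
        omega
      · intro a ha b hb heq
        subst heq
        rw [List.mem_append] at hb
        rw [hmem] at ha
        rcases hb with hb | hb <;> rw [hmem] at hb <;>
          simp only [pvGP, Bool.and_eq_true, decide_eq_true_eq, Prod.mk.injEq] at ha hb <;> omega
  · exact (PySem.List.pairwise_lt_pyRange_one _ _).filter _

-- ===== VERDICT (by name: the statement is the Claim_ definition above) =====
theorem find_conflict_rows_spec : Claim_equal_find_conflict_rows := by
  intro state _
  unfold Spec_find_conflict_rows find_conflict_rows find_conflict_rows_alt
  apply PySem.List.foldl_congr_mem
  intro acc r1 hr1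
  rw [PySem.List.mem_pyRange_one] at hr1
  by_cases hc1 : PySem.List.pyGetD state r1 0 < 0
  · simp only [if_pos hc1]
  · simp only [if_neg hc1]
    have hfun : (fun (rows : PySem.Set Int) row2 =>
        let col2 := PySem.List.pyGetD state row2 0
        if col2 < 0 then rows
        else if PySem.List.pyGetD state r1 0 = col2 ∨
            (r1 - row2).natAbs = (PySem.List.pyGetD state r1 0 - col2).natAbs then
          PySem.Set.add (PySem.Set.add rows r1) row2
        else rows) =
        (fun rows row2 =>
          if pvAP state r1 (PySem.List.pyGetD state r1 0) row2 = true then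
            PySem.Set.add (PySem.Set.add rows r1) row2
          else rows) := by
      funext rows row2
      by_cases h2 : PySem.List.pyGetD state row2 0 < 0
      · simp [h2, pvAP, pvC]
      · by_cases h3 : PySem.List.pyGetD state r1 0 = PySem.List.pyGetD state row2 0 ∨
            (r1 - row2).natAbs = (PySem.List.pyGetD state r1 0 - PySem.List.pyGetD state row2 0).natAbs
        · simp [h2, h3, pvAP, pvC]
        · simp [h2, h3, pvAP, pvC]
    rw [hfun, ← List.foldl_filter, pv_foldl_addadd]
    have hpv : ∀ j : Int, PySem.List.pyGetD state j 0 = pvC state j := fun _ => rfl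
    simp only [hpv, pv_groups_getD, pv_partners_eq state r1 hr1.1]
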